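-- pv_equiv track=rewrite | github.com/pollenjp/procon | abc/abc203/python/main_c.py | solve
-- ===== SOURCE A (Python) =====
-- from typing import List, Tuple
--
-- def solve(n: int, k: int, ab_list: List[Tuple[int, int]]) -> int:
--     # sort ab_list
--     ab_list = sorted(ab_list, key=lambda x: x[0])
--
--     stock: int = k
--     current_place: int = 0
--     a: int
--     b: int
--     for (a, b) in ab_list:
--         stock_left: int = stock - (a - current_place)
--         if stock_left >= 0:
--             stock = stock_left + b
--             current_place = a
--         else:
--             break
--
--     return stock + current_place
-- ===== SOURCE B (Python) =====
-- def solve(n, k, ab_list):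
--     pairs = sorted(ab_list, key=lambda x: x[0])
--     # stage 1: table of funds-plus-position after taking each prefix of offers
--     totals = [k]
--     for _, b in pairs:
--         totals.append(totals[-1] + b)
--     # stage 2: first offer whose position exceeds the funds available before it
--     for (a, _), t in zip(pairs, totals):
--         if t < a:
--             return t
--     return totals[-1]
-- ===== Notes on version B (the rewrite author's own statement) =====
-- stated objective: alternative
-- what changed: B replaces A's stateful simulation (stock, current_place, break) by two staged passes: first build the full prefix table totals[i] = k + sum of the first i rewards, then scan pairs zipped with that table and return the funds at the first unreachable offer (or the last table entry).
import Mathlib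
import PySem

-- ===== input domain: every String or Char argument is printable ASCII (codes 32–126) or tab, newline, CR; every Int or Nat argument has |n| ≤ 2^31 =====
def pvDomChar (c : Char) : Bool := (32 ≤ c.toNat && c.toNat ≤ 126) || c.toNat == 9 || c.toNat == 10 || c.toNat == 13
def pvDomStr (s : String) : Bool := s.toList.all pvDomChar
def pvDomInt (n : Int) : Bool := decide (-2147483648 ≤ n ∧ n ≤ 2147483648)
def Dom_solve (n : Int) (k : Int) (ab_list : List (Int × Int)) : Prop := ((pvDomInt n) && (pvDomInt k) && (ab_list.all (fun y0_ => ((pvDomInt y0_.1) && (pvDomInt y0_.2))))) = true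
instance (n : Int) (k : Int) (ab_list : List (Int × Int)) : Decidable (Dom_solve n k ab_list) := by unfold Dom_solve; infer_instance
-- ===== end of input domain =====

-- B replaces A's stateful (stock, current_place) simulation with a break by two staged passes:
-- build the prefix table of funds, then scan for the first unreachable offer; alternative decomposition, same cost.
-- ===== PORT A =====
-- the for-loop over the sorted list with break, carrying (stock, current_place)
def solveLoop (stock : Int) (current_place : Int) : List (Int × Int) → Int × Int
  | [] => (stock, current_place)
  | (a, b) :: rest =>
    let stock_left := stock - (a - current_place)
    if stock_left ≥ 0 then solveLoop (stock_left + b) a rest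
    else (stock, current_place)

def solve (n : Int) (k : Int) (ab_list : List (Int × Int)) : Int :=
  let ab_list := PySem.List.sorted ab_list (fun x => x.1) false
  let sp := solveLoop k 0 ab_list
  sp.1 + sp.2

-- ===== PORT B =====
-- stage 1: the loop 'totals.append(totals[-1] + b)' building the prefix table, front-to-back
def buildTotals (t : Int) : List (Int × Int) → List Int
  | [] => [t]
  | (_, b) :: rest => t :: buildTotals (t + b) rest

-- stage 2: the scan over zip(pairs, totals) returning at the first t < a
def scanCut : List ((Int × Int) × Int) → Option Int
  | [] => none
  | ((a, _), t) :: rest => if t < a then some t else scanCut rest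

def solve_alt (n : Int) (k : Int) (ab_list : List (Int × Int)) : Int :=
  let pairs := PySem.List.sorted ab_list (fun x => x.1) false
  let totals := buildTotals k pairs
  match scanCut (pairs.zip totals) with
  | some t => t
  | none => totals.getLastD 0   -- totals[-1]; totals is nonempty by construction

-- ===== PRECONDITION & SPEC =====
def Spec_solve (n : Int) (k : Int) (ab_list : List (Int × Int)) (out : Int) : Prop := out = solve_alt n k ab_list
instance (n : Int) (k : Int) (ab_list : List (Int × Int)) (out : Int) : Decidable (Spec_solve n k ab_list out) := by unfold Spec_solve; infer_instance

-- ===== CLAIM (what is proved, stated in full; the proofs are below) =====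
def Claim_equal_solve : Prop := ∀ (n : Int) (k : Int) (ab_list : List (Int × Int)), Dom_solve n k ab_list → Spec_solve n k ab_list (solve n k ab_list)

-- ===== LEMMAS AND PROOFS =====
theorem loop_eq (l : List (Int × Int)) : ∀ (stock place : Int),
    (solveLoop stock place l).1 + (solveLoop stock place l).2 =
      (match scanCut (l.zip (buildTotals (stock + place) l)) with
       | some t => t
       | none => (buildTotals (stock + place) l).getLastD 0) := by
  induction l with
  | nil => intro stock place; simp [solveLoop, buildTotals, scanCut]
  | cons hd tl ih =>
    intro stock place
    obtain ⟨a, b⟩ := hd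
    simp only [solveLoop, buildTotals, List.zip_cons_cons, scanCut]
    by_cases h : stock - (a - place) ≥ 0
    · rw [if_pos h, if_neg (by omega)]
      have := ih (stock - (a - place) + b) a
      have harg : stock - (a - place) + b + a = stock + place + b := by omega
      rw [harg] at this
      rw [this]
      cases hscan : scanCut (tl.zip (buildTotals (stock + place + b) tl)) with
      | some t => rfl
      | none =>
        show (buildTotals (stock + place + b) tl).getLastD 0 =
          ((stock + place) :: buildTotals (stock + place + b) tl).getLastD 0
        have hne : buildTotals (stock + place + b) tl ≠ [] := by
          cases tl with
          | nil => simp [buildTotals]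
          | cons x xs => obtain ⟨_, _⟩ := x; simp [buildTotals]
        rw [List.getLastD_cons]
        cases hl : (buildTotals (stock + place + b) tl).getLast? with
        | none => exact absurd (List.getLast?_eq_none_iff.mp hl) hne
        | some x => simp [List.getLastD_eq_getLast?, hl]
    · rw [if_neg h, if_pos (by omega)]

-- ===== VERDICT (by name: the statement is the Claim_ definition above) =====
theorem solve_spec : Claim_equal_solve := by
  intro n k ab_list _
  unfold Spec_solve solve solve_alt
  simpa using loop_eq _ k 0
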